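-- pv_equiv track=rewrite | github.com/suinleelab/path_explain | path_explain/utils.py | _find_step_increasing
-- ===== SOURCE A (Python) =====
-- def _find_step_increasing(index_list):
--     """
--     A helper function to find the sequential sublists
--     of a list.
--     """
--     indices = []
--     current_start = index_list[0]
--
--     for i in range(1, len(index_list)):
--         if index_list[i] != index_list[i - 1] + 1:
--             indices.append((current_start - 1, index_list[i - 1] + 1))
--             current_start = index_list[i]
--
--     indices.append((current_start - 1, index_list[-1] + 1))
--     return indices
-- ===== SOURCE B (Python) =====
-- def _find_step_increasing(index_list):
--     n = len(index_list)
--     cuts = [0] + [i for i in range(1, n)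
--                   if index_list[i] != index_list[i - 1] + 1] + [n]
--     return [(index_list[s] - 1, index_list[e - 1] + 1)
--             for s, e in zip(cuts, cuts[1:])]
-- ===== Notes on version B (the rewrite author's own statement) =====
-- stated objective: alternative
-- what changed: A's single scan threading a current_start accumulator and appending tuples inline is replaced by a two-phase form: first collect the cut positions (0, the break indices, n) in one pass, then in a second pass map each adjacent boundary pair (s,e) to (index_list[s]-1, index_list[e-1]+1).
import Mathlib
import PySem

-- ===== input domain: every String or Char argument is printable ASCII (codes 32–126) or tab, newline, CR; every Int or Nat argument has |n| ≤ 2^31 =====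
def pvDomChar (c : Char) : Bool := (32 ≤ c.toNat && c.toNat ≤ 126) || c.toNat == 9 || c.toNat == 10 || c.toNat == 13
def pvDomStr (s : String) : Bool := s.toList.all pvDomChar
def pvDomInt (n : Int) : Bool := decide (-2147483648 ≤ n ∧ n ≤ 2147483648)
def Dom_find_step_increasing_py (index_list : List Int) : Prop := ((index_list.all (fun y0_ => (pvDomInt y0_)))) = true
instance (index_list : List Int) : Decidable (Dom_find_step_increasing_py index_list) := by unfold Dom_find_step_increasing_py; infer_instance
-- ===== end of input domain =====

-- B replaces A's single inline scan (threading current_start) by a two-phase form: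
-- collect cut positions (0, the break indices, n), then map adjacent boundary pairs; objective: alternative (same O(n) cost).

-- ===== PORT A =====
def find_step_increasing_py (index_list : List Int) : List (Int × Int) :=
  match index_list with
  | [] => []  -- Python raises IndexError on index_list[0] here; excluded by Pre_
  | x :: _ =>
    let st := (PySem.List.pyRange 1 (index_list.length : Int) 1).foldl
      (fun (s : List (Int × Int) × Int) (i : Int) =>
        if PySem.List.pyGetD index_list i 0 ≠ PySem.List.pyGetD index_list (i - 1) 0 + 1 then
          (s.1 ++ [(s.2 - 1, PySem.List.pyGetD index_list (i - 1) 0 + 1)],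
           PySem.List.pyGetD index_list i 0)
        else s)
      ([], x)
    st.1 ++ [(st.2 - 1, PySem.List.pyGetD index_list (-1) 0 + 1)]

-- ===== PORT B =====
def find_step_increasing_py_alt (index_list : List Int) : List (Int × Int) :=
  let n : Int := index_list.length
  let cuts : List Int :=
    (0 :: (PySem.List.pyRange 1 n 1).filter
      (fun i => PySem.List.pyGetD index_list i 0 ≠ PySem.List.pyGetD index_list (i - 1) 0 + 1)) ++ [n]
  -- cuts[1:] = cuts.tail
  (cuts.zip cuts.tail).map (fun p =>
    (PySem.List.pyGetD index_list p.1 0 - 1, PySem.List.pyGetD index_list (p.2 - 1) 0 + 1))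

-- ===== PRECONDITION & SPEC =====
-- Pre_ excludes only the empty list, on which the Python A raises IndexError (index_list[0]).
def Pre_find_step_increasing_py (index_list : List Int) : Prop := index_list ≠ []
instance (index_list : List Int) : Decidable (Pre_find_step_increasing_py index_list) := by unfold Pre_find_step_increasing_py; infer_instance
def pvWitness_find_step_increasing_py : List Int := [3]

def Spec_find_step_increasing_py (index_list : List Int) (out : List (Int × Int)) : Prop := out = find_step_increasing_py_alt index_list
instance (index_list : List Int) (out : List (Int × Int)) : Decidable (Spec_find_step_increasing_py index_list out) := by unfold Spec_find_step_increasing_py; infer_instance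

-- ===== CLAIM (what is proved, stated in full; the proofs are below) =====
def Claim_equal_find_step_increasing_py : Prop := ∀ (index_list : List Int), Dom_find_step_increasing_py index_list → Pre_find_step_increasing_py index_list → Spec_find_step_increasing_py index_list (find_step_increasing_py index_list)

-- ===== LEMMAS AND PROOFS =====

-- the break condition, the fold body of port A, and the pair map of port B, named for the proofs
def pvBrk (l : List Int) (i : Int) : Bool :=
  decide (PySem.List.pyGetD l i 0 ≠ PySem.List.pyGetD l (i - 1) 0 + 1)

def pvStep (l : List Int) (s : List (Int × Int) × Int) (i : Int) : List (Int × Int) × Int :=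
  if pvBrk l i then
    (s.1 ++ [(s.2 - 1, PySem.List.pyGetD l (i - 1) 0 + 1)], PySem.List.pyGetD l i 0)
  else s

def pvPair (l : List Int) (p : Int × Int) : Int × Int :=
  (PySem.List.pyGetD l p.1 0 - 1, PySem.List.pyGetD l (p.2 - 1) 0 + 1)

-- segments described by a start cut c and the remaining break positions
def pvSegs (l : List Int) (c : Int) : List Int → List (Int × Int)
  | [] => [(PySem.List.pyGetD l c 0 - 1, PySem.List.pyGetD l ((l.length : Int) - 1) 0 + 1)]
  | b :: bs => (PySem.List.pyGetD l c 0 - 1, PySem.List.pyGetD l (b - 1) 0 + 1) :: pvSegs l b bs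

-- B's zip-of-cuts equals pvSegs
theorem zip_cuts_eq_segs (l : List Int) (c : Int) (bs : List Int) :
    (((c :: (bs ++ [(l.length : Int)])).zip (bs ++ [(l.length : Int)])).map (pvPair l))
      = pvSegs l c bs := by
  induction bs generalizing c with
  | nil => simp [pvPair, pvSegs]
  | cons b bs ih =>
    simp only [List.cons_append, List.zip_cons_cons, List.map_cons, pvSegs, pvPair]
    rw [← ih b]

-- A's fold from position j, started at last cut c, produces pvSegs of the breaks from j
theorem fold_eq_segs (l : List Int) (m : Nat) :
    ∀ (j : Int), 1 ≤ j → j ≤ (l.length : Int) → (l.length : Int) - j = m →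
    ∀ (c : Int) (acc : List (Int × Int)),
      ((PySem.List.pyRange j (l.length : Int) 1).foldl (pvStep l) (acc, PySem.List.pyGetD l c 0)).1
        ++ [(((PySem.List.pyRange j (l.length : Int) 1).foldl (pvStep l) (acc, PySem.List.pyGetD l c 0)).2 - 1,
             PySem.List.pyGetD l ((l.length : Int) - 1) 0 + 1)]
        = acc ++ pvSegs l c ((PySem.List.pyRange j (l.length : Int) 1).filter (fun i => pvBrk l i)) := by
  induction m with
  | zero =>
    intro j _ _ hm c acc
    have hj : j = (l.length : Int) := by omega
    simp [hj, PySem.List.pyRange_one_eq_nil le_rfl, pvSegs]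
  | succ m ih =>
    intro j hj1 hjn hm c acc
    have hlt : j < (l.length : Int) := by omega
    rw [PySem.List.pyRange_one_cons hlt, List.foldl_cons, List.filter_cons]
    by_cases hb : pvBrk l j
    · have hstep : pvStep l (acc, PySem.List.pyGetD l c 0) j
          = (acc ++ [(PySem.List.pyGetD l c 0 - 1, PySem.List.pyGetD l (j - 1) 0 + 1)],
             PySem.List.pyGetD l j 0) := by
        simp [pvStep, hb]
      rw [hstep, ih (j + 1) (by omega) (by omega) (by omega) j _, if_pos hb]
      simp [pvSegs]
    · have hstep : pvStep l (acc, PySem.List.pyGetD l c 0) j = (acc, PySem.List.pyGetD l c 0) := by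
        simp [pvStep, hb]
      rw [hstep, ih (j + 1) (by omega) (by omega) (by omega) c acc, if_neg hb]

theorem pyGetD_neg_one_eq (l : List Int) (hl : l ≠ []) :
    PySem.List.pyGetD l (-1) 0 = PySem.List.pyGetD l ((l.length : Int) - 1) 0 := by
  have h1 : 1 ≤ l.length := List.length_pos_iff.mpr hl
  rw [PySem.List.pyGetD_neg_one l 0 hl]
  have : (l.length : Int) - 1 = ((l.length - 1 : Nat) : Int) := by omega
  rw [this, PySem.List.pyGetD_natCast]
  rw [List.getLast_eq_getElem, List.getD_eq_getElem _ _ (by omega)]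

-- ===== VERDICT (by name: the statement is the Claim_ definition above) =====
theorem find_step_increasing_py_spec : Claim_equal_find_step_increasing_py := by
  intro l _ hpre
  unfold Spec_find_step_increasing_py find_step_increasing_py find_step_increasing_py_alt
  match l, hpre with
  | x :: xs, _ =>
    rw [pyGetD_neg_one_eq (x :: xs) (by simp)]
    show (List.foldl
          (fun (s : List (Int × Int) × Int) (i : Int) =>
            if PySem.List.pyGetD (x :: xs) i 0 ≠ PySem.List.pyGetD (x :: xs) (i - 1) 0 + 1 then
              (s.1 ++ [(s.2 - 1, PySem.List.pyGetD (x :: xs) (i - 1) 0 + 1)], PySem.List.pyGetD (x :: xs) i 0)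
            else s)
          ([], x) (PySem.List.pyRange 1 ((x :: xs).length : Int) 1)).1
        ++ [((List.foldl
          (fun (s : List (Int × Int) × Int) (i : Int) =>
            if PySem.List.pyGetD (x :: xs) i 0 ≠ PySem.List.pyGetD (x :: xs) (i - 1) 0 + 1 then
              (s.1 ++ [(s.2 - 1, PySem.List.pyGetD (x :: xs) (i - 1) 0 + 1)], PySem.List.pyGetD (x :: xs) i 0)
            else s)
          ([], x) (PySem.List.pyRange 1 ((x :: xs).length : Int) 1)).2 - 1,
             PySem.List.pyGetD (x :: xs) (((x :: xs).length : Int) - 1) 0 + 1)]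
      = (((0 : Int) :: ((PySem.List.pyRange 1 ((x :: xs).length : Int) 1).filter
              (fun i => decide (PySem.List.pyGetD (x :: xs) i 0 ≠ PySem.List.pyGetD (x :: xs) (i - 1) 0 + 1))
            ++ [((x :: xs).length : Int)])).zip
          ((PySem.List.pyRange 1 ((x :: xs).length : Int) 1).filter
              (fun i => decide (PySem.List.pyGetD (x :: xs) i 0 ≠ PySem.List.pyGetD (x :: xs) (i - 1) 0 + 1))
            ++ [((x :: xs).length : Int)])).map
          (fun p : Int × Int => (PySem.List.pyGetD (x :: xs) p.1 0 - 1, PySem.List.pyGetD (x :: xs) (p.2 - 1) 0 + 1))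
    have hfn : (fun (s : List (Int × Int) × Int) (i : Int) =>
        if PySem.List.pyGetD (x :: xs) i 0 ≠ PySem.List.pyGetD (x :: xs) (i - 1) 0 + 1 then
          (s.1 ++ [(s.2 - 1, PySem.List.pyGetD (x :: xs) (i - 1) 0 + 1)], PySem.List.pyGetD (x :: xs) i 0)
        else s) = pvStep (x :: xs) := by
      funext s i
      simp only [pvStep, pvBrk, decide_eq_true_eq]
    have hcond : (fun i => decide (PySem.List.pyGetD (x :: xs) i 0 ≠ PySem.List.pyGetD (x :: xs) (i - 1) 0 + 1))
        = fun i => pvBrk (x :: xs) i := by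
      funext i
      simp only [pvBrk]
    have hpair : (fun p : Int × Int => (PySem.List.pyGetD (x :: xs) p.1 0 - 1, PySem.List.pyGetD (x :: xs) (p.2 - 1) 0 + 1))
        = pvPair (x :: xs) := rfl
    rw [hfn, hcond, hpair]
    have hfold := fold_eq_segs (x :: xs) ((x :: xs).length - 1) 1 le_rfl (by simp) (by simp) 0 []
    rw [PySem.List.pyGetD_zero_cons] at hfold
    rw [hfold, zip_cuts_eq_segs]
    simp
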